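-- pv_equiv track=rewrite | github.com/bhelfrecht/zeolites_iza-deem | Scripts/gulp.py | find_deem_subdir
-- ===== SOURCE A (Python) =====
-- def find_deem_subdir(basename, base_dir):
--     """
--         Find the correct subdirectory of a
--         Deem database structure based on its ID
--
--         ---Arguments---
--         basename: the structure ID
--         base_dir: the directory where the structures are archived
--
--         ---Returns---
--         subdir: the directory within the base_dir where
--             the desired structure (with ID basename)
--             can be found
--     """
--
--     # Key for finding the subdirectories
--     dir_codes = {
--         '800-804': ['800', '801', '802', '803', '804'],
--         '805-809': ['805', '806', '807', '808', '809'],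
--         '810-814': ['810', '811', '812', '813', '814'],
--         '815-819': ['815', '816', '817', '818', '819'],
--         '820-824': ['820', '821', '822', '823', '824'],
--         '825-829': ['825', '826', '827', '828', '829'],
--         '830-833': ['830', '831', '832', '833']
--     }
--
--     # Get first 3 digits of the ID and find the subdirectory
--     basename_code = basename[0:3]
--     for subdir, codes in dir_codes.items():
--         if basename_code in codes:
--             return subdir
-- ===== SOURCE B (Python) =====
-- def find_deem_subdir(basename, base_dir):
--     # Closed-form: parse the 3-char code digit by digit and compute the bucket bounds.
--     code = basename[0:3]
--     if len(code) == 3 and code.isdigit():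
--         n = (ord(code[0]) - 48) * 100 + (ord(code[1]) - 48) * 10 + (ord(code[2]) - 48)
--         if 800 <= n <= 833:
--             start = (n // 5) * 5
--             end = 833 if start == 830 else start + 4
--             return f"{start}-{end}"
--     return None
-- ===== Notes on version B (the rewrite author's own statement) =====
-- stated objective: simpler
-- what changed: Replaces the hard-coded bucket dictionary and its linear membership scan by a closed-form computation: validate that basename[0:3] is a 3-digit code, parse it to an integer, range-check 800..833, and build the bucket name 'start-end' arithmetically (end clamped to 833 for the last bucket).
import Mathlib
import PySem

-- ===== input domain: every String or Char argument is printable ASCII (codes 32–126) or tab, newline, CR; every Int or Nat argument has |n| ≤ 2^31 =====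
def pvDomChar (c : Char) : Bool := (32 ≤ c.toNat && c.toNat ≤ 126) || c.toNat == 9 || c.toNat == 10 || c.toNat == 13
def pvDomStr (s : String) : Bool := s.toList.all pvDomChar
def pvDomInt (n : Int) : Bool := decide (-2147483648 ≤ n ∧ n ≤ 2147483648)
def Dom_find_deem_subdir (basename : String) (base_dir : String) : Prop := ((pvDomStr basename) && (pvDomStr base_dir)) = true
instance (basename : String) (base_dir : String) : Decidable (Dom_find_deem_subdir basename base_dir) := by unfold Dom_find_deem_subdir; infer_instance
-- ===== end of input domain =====

-- B replaces A's scan over a hard-coded bucket dictionary by a closed-form computation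
-- (parse the 3-char code digit by digit, then arithmetic on the bucket bounds); objective: simpler.


-- ===== PORT A =====
-- the dict literal `dir_codes` (insertion order)
def pvDirCodes : List (String × List String) :=
  [("800-804", ["800", "801", "802", "803", "804"]),
   ("805-809", ["805", "806", "807", "808", "809"]),
   ("810-814", ["810", "811", "812", "813", "814"]),
   ("815-819", ["815", "816", "817", "818", "819"]),
   ("820-824", ["820", "821", "822", "823", "824"]),
   ("825-829", ["825", "826", "827", "828", "829"]),
   ("830-833", ["830", "831", "832", "833"])]

-- the `for subdir, codes in dir_codes.items()` loop with its early return
def pvFindA (basename_code : String) : List (String × List String) → Option String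
  | [] => none
  | (subdir, codes) :: rest =>
      if codes.contains basename_code then some subdir else pvFindA basename_code rest

def find_deem_subdir (basename : String) (base_dir : String) : Option String :=
  let basename_code := PySem.Str.slice basename (some 0) (some 3)
  pvFindA basename_code pvDirCodes

-- ===== PORT B =====
-- helper `_bucket(code)` of Source B; `code[i]` is guarded by the length check, so the
-- `.getD '0'` default is unreachable
def pvBucket (code : String) : Option String :=
  if PySem.Str.len code == 3 && PySem.Str.strIsdigit code then
    let n : Int := ((((PySem.Str.pyGet? code 0).getD '0').toNat : Int) - 48) * 100
                 + ((((PySem.Str.pyGet? code 1).getD '0').toNat : Int) - 48) * 10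
                 + ((((PySem.Str.pyGet? code 2).getD '0').toNat : Int) - 48)
    if 800 ≤ n ∧ n ≤ 833 then
      let start := PySem.Int.floordiv n 5 * 5
      let stop : Int := if start == 830 then 833 else start + 4
      some (PySem.Int.toStr start ++ "-" ++ PySem.Int.toStr stop)
    else none
  else none

def find_deem_subdir_alt (basename : String) (base_dir : String) : Option String :=
  pvBucket (PySem.Str.slice basename (some 0) (some 3))

-- ===== PRECONDITION & SPEC =====
def Spec_find_deem_subdir (basename : String) (base_dir : String) (out : Option String) : Prop := out = find_deem_subdir_alt basename base_dir
instance (basename : String) (base_dir : String) (out : Option String) : Decidable (Spec_find_deem_subdir basename base_dir out) := by unfold Spec_find_deem_subdir; infer_instance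

-- ===== CLAIM (what is proved, stated in full; the proofs are below) =====
def Claim_equal_find_deem_subdir : Prop := ∀ (basename : String) (base_dir : String), Dom_find_deem_subdir basename base_dir → Spec_find_deem_subdir basename base_dir (find_deem_subdir basename base_dir)

-- ===== LEMMAS AND PROOFS =====


-- A returns none whenever the code is not a 3-character digit string
lemma pvFindA_none (code : String)
    (hbad : ¬ (code.toList.length = 3 ∧ code.toList.all PySem.Chars.isdigit = true)) :
    pvFindA code pvDirCodes = none := by
  have key : ∀ (l : List String),
      (∀ s ∈ l, s.toList.length = 3 ∧ s.toList.all PySem.Chars.isdigit = true) →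
      l.contains code = false := by
    intro l hl
    have hnm : code ∉ l := fun hc => hbad (hl code hc)
    simpa using hnm
  have k1 := key ["800", "801", "802", "803", "804"] (by decide)
  have k2 := key ["805", "806", "807", "808", "809"] (by decide)
  have k3 := key ["810", "811", "812", "813", "814"] (by decide)
  have k4 := key ["815", "816", "817", "818", "819"] (by decide)
  have k5 := key ["820", "821", "822", "823", "824"] (by decide)
  have k6 := key ["825", "826", "827", "828", "829"] (by decide)
  have k7 := key ["830", "831", "832", "833"] (by decide)
  simp only [pvFindA, pvDirCodes]
  rw [k1, k2, k3, k4, k5, k6, k7]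
  simp

-- the digit case, by exhausting the three digits
set_option maxHeartbeats 2000000 in
lemma pv_digits_nat : ∀ x y z : Fin 10,
    pvFindA (String.ofList [Char.ofNat (48 + x.val), Char.ofNat (48 + y.val), Char.ofNat (48 + z.val)]) pvDirCodes
      = pvBucket (String.ofList [Char.ofNat (48 + x.val), Char.ofNat (48 + y.val), Char.ofNat (48 + z.val)]) := by
  decide

-- the core equivalence, on the sliced code
lemma pv_core (code : String) :
    pvFindA code pvDirCodes = pvBucket code := by
  have hofl : String.ofList code.toList = code := by simp
  by_cases h3 : code.toList.length = 3 ∧ code.toList.all PySem.Chars.isdigit = true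
  · obtain ⟨hlen, hdig⟩ := h3
    obtain ⟨a, b, c, hcs⟩ := List.length_eq_three.mp hlen
    rw [hcs] at hdig
    simp only [List.all_cons, List.all_nil, Bool.and_true, Bool.and_eq_true] at hdig
    obtain ⟨ha, hb, hc⟩ := hdig
    have hba : 48 ≤ a.toNat ∧ a.toNat ≤ 57 := by
      unfold PySem.Chars.isdigit at ha; simp [Char.le_def] at ha; exact ⟨ha.1, ha.2⟩
    have hbb : 48 ≤ b.toNat ∧ b.toNat ≤ 57 := by
      unfold PySem.Chars.isdigit at hb; simp [Char.le_def] at hb; exact ⟨hb.1, hb.2⟩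
    have hbc : 48 ≤ c.toNat ∧ c.toNat ≤ 57 := by
      unfold PySem.Chars.isdigit at hc; simp [Char.le_def] at hc; exact ⟨hc.1, hc.2⟩
    have hx : Char.ofNat (48 + (a.toNat - 48)) = a := by
      rw [(by omega : 48 + (a.toNat - 48) = a.toNat)]; exact Char.ofNat_toNat a
    have hy : Char.ofNat (48 + (b.toNat - 48)) = b := by
      rw [(by omega : 48 + (b.toNat - 48) = b.toNat)]; exact Char.ofNat_toNat b
    have hz : Char.ofNat (48 + (c.toNat - 48)) = c := by
      rw [(by omega : 48 + (c.toNat - 48) = c.toNat)]; exact Char.ofNat_toNat c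
    rw [← hofl, hcs, ← hx, ← hy, ← hz]
    exact pv_digits_nat ⟨a.toNat - 48, by omega⟩ ⟨b.toNat - 48, by omega⟩ ⟨c.toNat - 48, by omega⟩
  · rw [pvFindA_none code h3]
    have hlen' : code.length = code.toList.length := by simp
    have hguard : (PySem.Str.len code == 3 && PySem.Str.strIsdigit code) = false := by
      by_cases hl : code.toList.length = 3
      · have hd : code.toList.all PySem.Chars.isdigit = false := by
          cases hall : code.toList.all PySem.Chars.isdigit
          · rfl
          · exact absurd ⟨hl, hall⟩ h3
        simp [PySem.Chars.strIsdigit, hd]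
      · simp
        intro hc
        exact absurd (by omega : code.toList.length = 3) hl
    simp only [pvBucket]
    rw [hguard]
    simp

theorem pv_main (basename base_dir : String) :
    find_deem_subdir basename base_dir = find_deem_subdir_alt basename base_dir := by
  unfold find_deem_subdir find_deem_subdir_alt
  exact pv_core _

-- ===== VERDICT (by name: the statement is the Claim_ definition above) =====
theorem find_deem_subdir_spec : Claim_equal_find_deem_subdir := by
  intro basename base_dir _
  unfold Spec_find_deem_subdir
  exact pv_main basename base_dir
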